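-- pv_equiv track=rewrite | github.com/KarolWes/AdventofCode2021 | advent18.py | ssplit
-- ===== SOURCE A (Python) =====
-- import math
--
-- def ssplit(line):
--     res = []
--     correction = False
--     for el in line:
--         if el[0] > 9 and not(correction):
--             left = [math.floor(el[0]/2), el[1]+1]
--             right = [math.ceil(el[0]/2), el[1]+1]
--             res.append(left)
--             res.append(right)
--             correction = True
--         else:
--             res.append(el)
--     return res
-- ===== SOURCE B (Python) =====
-- def ssplit(line):
--     n = len(line)
--     if n == 0:
--         return []
--     if n == 1:
--         el = line[0]
--         if el[0] > 9:
--             return [[el[0] // 2, el[1] + 1], [(el[0] + 1) // 2, el[1] + 1]]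
--         return [el]
--     mid = n // 2
--     left = ssplit(line[:mid])
--     if len(left) > mid:
--         return left + line[mid:]
--     return left + ssplit(line[mid:])
-- ===== Notes on version B (the rewrite author's own statement) =====
-- stated objective: alternative
-- what changed: B is a divide-and-conquer recursion: it halves the list, splits in the left half first, and detects via the result length whether a split already happened before deciding to recurse into the right half, replacing A's single accumulating pass with a boolean flag; slicing makes it O(n log n) rather than faster.
import Mathlib
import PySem

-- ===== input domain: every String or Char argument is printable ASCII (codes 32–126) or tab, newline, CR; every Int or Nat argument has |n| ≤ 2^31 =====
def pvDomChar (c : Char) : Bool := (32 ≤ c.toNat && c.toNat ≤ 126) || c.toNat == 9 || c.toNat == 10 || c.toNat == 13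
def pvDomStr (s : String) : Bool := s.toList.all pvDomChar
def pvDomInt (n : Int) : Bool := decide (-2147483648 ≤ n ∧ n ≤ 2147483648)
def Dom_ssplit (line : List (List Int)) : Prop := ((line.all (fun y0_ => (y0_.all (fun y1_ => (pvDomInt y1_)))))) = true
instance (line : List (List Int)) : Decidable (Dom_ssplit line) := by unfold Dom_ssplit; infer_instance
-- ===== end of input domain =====

-- B replaces A's single accumulating pass with a flag by a divide-and-conquer recursion
-- (split left half, detect a performed split by length, else recurse right); not faster, alternative structure.

-- ===== PORT A =====
-- Loop with accumulator res and flag `correction`; el[0]/el[1] are safe under Pre_,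
-- ported as headD/getD. math.floor(el[0]/2) = el[0]//2 and math.ceil(el[0]/2) = (el[0]+1)//2
-- exactly, since |el[0]| ≤ 2^31 < 2^53 keeps the float division exact.
def ssplitGo (rest : List (List Int)) (correction : Bool) : List (List Int) :=
  match rest with
  | [] => []
  | el :: rest' =>
    if 9 < el.headD 0 ∧ correction = false then
      [PySem.Int.floordiv (el.headD 0) 2, el.getD 1 0 + 1] ::
      [PySem.Int.floordiv (el.headD 0 + 1) 2, el.getD 1 0 + 1] :: ssplitGo rest' true
    else
      el :: ssplitGo rest' correction

def ssplit (line : List (List Int)) : List (List Int) := ssplitGo line false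

-- ===== PORT B =====
-- Termination facts for ssplit_alt's recursion (cited by name in decreasing_by).
theorem pvTakeHalfLt (l : List (List Int)) (h : ¬ l.length = 0) :
    (l.take (l.length / 2)).length < l.length := by
  rw [List.length_take]; omega

theorem pvDropHalfLt (l : List (List Int)) (h0 : ¬ l.length = 0) (h1 : ¬ l.length = 1) :
    (l.drop (l.length / 2)).length < l.length := by
  rw [List.length_drop]; omega

-- Divide and conquer exactly as in Source B; line[:mid]/line[mid:] → take/drop (mid = n//2, Nat division).
def ssplit_alt (line : List (List Int)) : List (List Int) :=
  if _h0 : line.length = 0 then []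
  else if _h1 : line.length = 1 then
    let el := line.headD []
    if 9 < el.headD 0 then
      [[PySem.Int.floordiv (el.headD 0) 2, el.getD 1 0 + 1],
       [PySem.Int.floordiv (el.headD 0 + 1) 2, el.getD 1 0 + 1]]
    else [el]
  else
    let mid := line.length / 2
    let left := ssplit_alt (line.take mid)
    if mid < left.length then left ++ line.drop mid
    else left ++ ssplit_alt (line.drop mid)
termination_by line.length
decreasing_by
  · exact pvTakeHalfLt line _h0
  · exact pvDropHalfLt line _h0 _h1

-- ===== PRECONDITION & SPEC =====
-- Python A raises IndexError iff some element is the empty list (el[0]) or the first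
-- element with el[0] > 9 has only one component (el[1]); Pre_ excludes exactly those.
def Pre_ssplit (line : List (List Int)) : Prop :=
  (∀ el ∈ line, el ≠ []) ∧
  ((line.find? (fun el => 9 < el.headD 0)).all (fun el => 2 ≤ el.length) = true)
instance (line : List (List Int)) : Decidable (Pre_ssplit line) := by unfold Pre_ssplit; infer_instance
def pvWitness_ssplit : List (List Int) := [[12, 0], [3, 1]]

def Spec_ssplit (line : List (List Int)) (out : List (List Int)) : Prop := out = ssplit_alt line
instance (line : List (List Int)) (out : List (List Int)) : Decidable (Spec_ssplit line out) := by unfold Spec_ssplit; infer_instance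

-- ===== CLAIM (what is proved, stated in full; the proofs are below) =====
def Claim_equal_ssplit : Prop := ∀ (line : List (List Int)), Dom_ssplit line → Pre_ssplit line → Spec_ssplit line (ssplit line)

-- ===== LEMMAS AND PROOFS =====
theorem ssplitGo_true (l : List (List Int)) : ssplitGo l true = l := by
  induction l with
  | nil => rfl
  | cons el rest ih => simp [ssplitGo, ih]

-- A's pass over a concatenation: if the first part contained a big element, the second is copied verbatim.
theorem ssplitGo_append (a b : List (List Int)) :
    ssplitGo (a ++ b) false =
      ssplitGo a false ++ (if a.any (fun el => 9 < el.headD 0) then b else ssplitGo b false) := by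
  induction a with
  | nil => simp [ssplitGo]
  | cons el rest ih =>
    by_cases h : 9 < el.headD 0
    · have h' : 9 < el.head?.getD 0 := by simpa [List.headD_eq_head?] using h
      simp [ssplitGo, h', ssplitGo_true]
    · have h' : ¬ 9 < el.head?.getD 0 := by simpa [List.headD_eq_head?] using h
      simp [ssplitGo, h', ih]

theorem ssplitGo_length (a : List (List Int)) :
    (ssplitGo a false).length =
      a.length + (if a.any (fun el => 9 < el.headD 0) then 1 else 0) := by
  induction a with
  | nil => simp [ssplitGo]
  | cons el rest ih =>
    by_cases h : 9 < el.headD 0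
    · have h' : 9 < el.head?.getD 0 := by simpa [List.headD_eq_head?] using h
      simp [ssplitGo, h', ssplitGo_true]
    · have h' : ¬ 9 < el.head?.getD 0 := by simpa [List.headD_eq_head?] using h
      simp [ssplitGo, h', ih]
      omega

theorem ssplit_alt_eq_go (l : List (List Int)) : ssplit_alt l = ssplitGo l false := by
  generalize hn : l.length = n
  induction n using Nat.strong_induction_on generalizing l with
  | _ n ih =>
    rw [ssplit_alt]
    split
    · next h0 =>
      have : l = [] := List.length_eq_zero_iff.mp h0
      subst this; rfl
    · next h0 =>
      split
      · next h1 =>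
        obtain ⟨el, rfl⟩ : ∃ el, l = [el] := List.length_eq_one_iff.mp h1
        simp [ssplitGo]
      · next h1 =>
        have h2 : 2 ≤ l.length := by
          rcases Nat.lt_or_ge l.length 2 with hlt | hge
          · interval_cases h : l.length <;> simp_all
          · exact hge
        dsimp only
        set mid := l.length / 2 with hmid
        have hm1 : 1 ≤ mid := by omega
        have hmlt : mid < l.length := by omega
        have htl : (l.take mid).length = mid := by
          rw [List.length_take]; omega
        rw [ih (l.take mid).length (by omega) _ rfl,
            ih (l.drop mid).length (by rw [List.length_drop]; omega) _ rfl]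
        conv_rhs => rw [show l = l.take mid ++ l.drop mid from (List.take_append_drop mid l).symm]
        rw [ssplitGo_append]
        by_cases hb : (l.take mid).any (fun el => 9 < el.headD 0)
        · rw [if_pos hb]
          have hlen' : mid < (ssplitGo (l.take mid) false).length := by
            rw [ssplitGo_length, if_pos hb, htl]; omega
          rw [if_pos hlen']
        · rw [if_neg hb]
          have hlen' : ¬ mid < (ssplitGo (l.take mid) false).length := by
            rw [ssplitGo_length, if_neg hb, htl]; omega
          rw [if_neg hlen']

-- ===== VERDICT (by name: the statement is the Claim_ definition above) =====
theorem ssplit_spec : Claim_equal_ssplit := by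
  intro line _ _
  show ssplit line = ssplit_alt line
  exact (ssplit_alt_eq_go line).symm
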